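-- pv_equiv track=rewrite | github.com/varunprasad17/xlsx-streamer | src/xlsx_streamer/xlsx_generator.py | _sparse_to_dense_row
-- ===== SOURCE A (Python) =====
-- from typing import Any, BinaryIO, cast, overload
--
-- def _sparse_to_dense_row(sparse_row: dict[int, Any]) -> list[Any]:
--     """
--     Converts a sparse row dictionary (col_index: value) into a dense list,
--     padding missing columns with empty strings.
--     """
--     if not sparse_row:
--         return []
--
--     # 1. Determine the maximum column index to define the required row width.
--     # The length of the dense list will be (max_col_index + 1).
--
--     try:
--         max_col_index = max(sparse_row.keys())
--     except ValueError:
--         # Should not happen if 'if not sparse_row' check passes, but for safety.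
--         return []
--
--     # 2. Initialize the dense list with the appropriate size.
--     # This ensures that empty cells are represented as empty strings.
--     dense_row = [""] * (max_col_index + 1)
--
--     # 3. Fill the list using the data from the sparse dictionary.
--     for col_index, value in sparse_row.items():
--         dense_row[col_index] = value
--     return dense_row
-- ===== SOURCE B (Python) =====
-- def _sparse_to_dense_row(sparse_row):
--     """
--     Converts a sparse row dictionary (col_index: value) into a dense list,
--     padding missing columns with empty strings.
--
--     Sort-and-gap-fill: walk the column indices in ascending order, emitting
--     the run of empty-string padding before each occupied column and then its
--     value; no maximum is computed and no buffer is preallocated.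
--     """
--     dense = []
--     for col in sorted(sparse_row):
--         dense.extend([""] * (col - len(dense)))
--         dense.append(sparse_row[col])
--     return dense
-- ===== Notes on version B (the rewrite author's own statement) =====
-- stated objective: alternative
-- what changed: B sorts the column indices and builds the row left-to-right by emitting the run of empty-string padding before each occupied column and then its value (sort-and-gap-fill), instead of A's scatter (compute max, preallocate a padded buffer, write each dict item into it by index); Pre_ restricts to the natural domain of nonnegative column indices, since on a negative key A either raises IndexError or writes via Python's negative-index convention, a corner the function's contract does not specify.
-- outside the precondition, e.g. on _sparse_to_dense_row({2: 'a', -1: 'b'}): A returns ['', '', 'b'], B returns ['b', '', 'a']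
import Mathlib
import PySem

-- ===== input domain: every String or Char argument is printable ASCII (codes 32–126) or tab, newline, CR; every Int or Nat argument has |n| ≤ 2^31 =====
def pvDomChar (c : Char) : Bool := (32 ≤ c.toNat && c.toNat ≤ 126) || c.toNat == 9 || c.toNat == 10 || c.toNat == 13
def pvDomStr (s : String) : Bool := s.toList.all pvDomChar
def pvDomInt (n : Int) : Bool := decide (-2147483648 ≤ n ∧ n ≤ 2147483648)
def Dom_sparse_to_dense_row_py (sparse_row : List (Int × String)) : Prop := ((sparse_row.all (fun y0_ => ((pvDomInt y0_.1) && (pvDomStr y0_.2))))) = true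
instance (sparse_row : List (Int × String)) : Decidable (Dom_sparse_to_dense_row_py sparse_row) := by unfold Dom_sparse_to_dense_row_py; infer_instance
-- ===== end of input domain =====

-- B sorts the column indices and builds the row by emitting the run of padding before each
-- occupied column and then its value (sort-and-gap-fill), instead of A's scatter
-- (compute max, preallocate a padded buffer, write items into it by index): alternative.

-- ===== PORT A =====
def sparse_to_dense_row_py (sparse_row : List (Int × String)) : List String :=
  let d := PySem.Dict.ofList sparse_row
  if d.items = [] then []
  else
    match PySem.List.max? d.keys (fun k => k) with
    | none => []  -- 'except ValueError: return []' (unreachable, kept as in A)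
    | some max_col_index =>
      let dense_row := List.replicate (max_col_index + 1).toNat ""
      d.items.foldl (fun dr kv => PySem.List.pySetD dr kv.1 kv.2) dense_row

-- ===== PORT B =====
def sparse_to_dense_row_py_alt (sparse_row : List (Int × String)) : List String :=
  let d := PySem.Dict.ofList sparse_row
  -- sparse_row[col] cannot raise KeyError (col is drawn from the keys), so getD is exact here
  (PySem.List.sorted d.keys (fun k => k) false).foldl
    (fun dense col =>
      (dense ++ List.replicate ((col - (dense.length : Int)).toNat) "") ++ [d.getD col ""])
    []

-- ===== PRECONDITION & SPEC =====
-- Pre_ restricts to the function's natural domain: column indices are nonnegative. On a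
-- negative key A either raises IndexError (key < -(max+1)) or applies Python's
-- negative-index convention and writes the value near the end of the buffer, while B
-- places it before column 0; neither behaviour is specified for this corner.
def Pre_sparse_to_dense_row_py (sparse_row : List (Int × String)) : Prop :=
  ∀ p ∈ sparse_row, 0 ≤ p.1
instance (sparse_row : List (Int × String)) : Decidable (Pre_sparse_to_dense_row_py sparse_row) := by unfold Pre_sparse_to_dense_row_py; infer_instance

def pvWitness_sparse_to_dense_row_py : (List (Int × String)) := [(0, "a"), (2, "b")]

def Spec_sparse_to_dense_row_py (sparse_row : List (Int × String)) (out : List String) : Prop := out = sparse_to_dense_row_py_alt sparse_row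
instance (sparse_row : List (Int × String)) (out : List String) : Decidable (Spec_sparse_to_dense_row_py sparse_row out) := by unfold Spec_sparse_to_dense_row_py; infer_instance

-- ===== CLAIM (what is proved, stated in full; the proofs are below) =====
def Claim_equal_sparse_to_dense_row_py : Prop := ∀ (sparse_row : List (Int × String)), Dom_sparse_to_dense_row_py sparse_row → Pre_sparse_to_dense_row_py sparse_row → Spec_sparse_to_dense_row_py sparse_row (sparse_to_dense_row_py sparse_row)

-- ===== LEMMAS AND PROOFS =====

-- keys of a dict built from an association list are the deduplicated first components
lemma keys_ofList_eq (xs : List (Int × String)) :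
    (PySem.Dict.ofList xs).keys = PySem.Set.ofList (xs.map Prod.fst) := by
  have h := PySem.Dict.keys_foldl_insert_key (ν := String) xs Prod.fst
    (fun _ p => p.2) PySem.Dict.empty
  simpa [PySem.Dict.ofList, PySem.Dict.update, PySem.Set.update_nil_left] using h

lemma mem_keys_ofList {xs : List (Int × String)} {k : Int}
    (h : k ∈ (PySem.Dict.ofList xs).keys) : ∃ p ∈ xs, p.1 = k := by
  rw [keys_ofList_eq] at h
  rcases (PySem.Set.mem_ofList _ _).1 h with hm
  rcases List.mem_map.1 hm with ⟨p, hp, hpk⟩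
  exact ⟨p, hp, hpk⟩

-- the scatter loop preserves the buffer's length
lemma length_foldl_pySetD (l : List (Int × String)) (xs : List String) :
    (l.foldl (fun dr kv => PySem.List.pySetD dr kv.1 kv.2) xs).length = xs.length := by
  induction l generalizing xs with
  | nil => rfl
  | cons p t ih => simp [List.foldl_cons, ih, PySem.List.length_pySetD]

-- characterisation of the scatter loop: with distinct in-range nonnegative keys, slot j
-- holds the (unique) value written at j, else the initial buffer's value
lemma foldl_pySetD_getD (l : List (Int × String)) (xs : List String)
    (hnd : (l.map Prod.fst).Nodup)
    (hb : ∀ p ∈ l, 0 ≤ p.1 ∧ p.1.toNat < xs.length) (j : Nat) (hj : j < xs.length) :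
    (l.foldl (fun dr kv => PySem.List.pySetD dr kv.1 kv.2) xs).getD j "" =
      ((l.find? (fun kv => kv.1 == (j : Int))).map Prod.snd).getD (xs.getD j "") := by
  induction l generalizing xs with
  | nil => simp
  | cons p t ih =>
    have h0 : 0 ≤ p.1 := (hb p (by simp)).1
    have hlt : p.1.toNat < xs.length := (hb p (by simp)).2
    simp only [List.foldl_cons, List.find?]
    rw [PySem.List.pySetD_of_nonneg xs p.2 h0]
    have hlen : (xs.set p.1.toNat p.2).length = xs.length := by simp
    have ih' := ih (xs.set p.1.toNat p.2)
      (by exact hnd.of_cons)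
      (by intro q hq; exact ⟨(hb q (List.mem_cons_of_mem _ hq)).1,
            by rw [hlen]; exact (hb q (List.mem_cons_of_mem _ hq)).2⟩)
      (by rw [hlen]; exact hj)
    by_cases hpj : p.1 = (j : Int)
    · have hbeq : (p.1 == (j : Int)) = true := by simpa using hpj
      rw [hbeq]
      have hfind : t.find? (fun kv => kv.1 == (j : Int)) = none := by
        apply List.find?_eq_none.2
        intro q hq hfalse
        have hq1 : q.1 = (j : Int) := by simpa using hfalse
        have : p.1 ∈ t.map Prod.fst := by
          rw [hpj, ← hq1]; exact List.mem_map.2 ⟨q, hq, rfl⟩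
        exact (List.nodup_cons.1 hnd).1 this
      rw [ih', hfind]
      have hjn : p.1.toNat = j := by omega
      simp [hjn, hj]
    · have hbeq : (p.1 == (j : Int)) = false := by simpa using hpj
      rw [hbeq]
      rw [ih']
      have hne : p.1.toNat ≠ j := by omega
      congr 1
      rw [List.getD_eq_getElem _ _ hj, List.getD_eq_getElem _ _ (by rw [hlen]; exact hj)]
      simp [List.getElem_set_ne hne]

-- end bound of the gap-fill pass: one past the last (largest) remaining column index
def fillEnd (ks : List Int) (n : Int) : Int :=
  match ks.getLast? with
  | none => n
  | some k => k + 1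

lemma fillEnd_cons (k : Int) (t : List Int) (n : Int) :
    fillEnd (k :: t) n = fillEnd t (k + 1) := by
  cases t with
  | nil => simp [fillEnd]
  | cons a s =>
    simp only [fillEnd, List.getLast?_cons_cons]
    rw [List.getLast?_eq_some_getLast (l := a :: s) (by simp)]

lemma fillEnd_of_ne_nil (ks : List Int) (n : Int) (h : ks ≠ []) :
    fillEnd ks n = ks.getLast h + 1 := by
  unfold fillEnd
  rw [List.getLast?_eq_some_getLast h]

-- the last element of a strictly increasing list bounds every element
lemma le_getLast_of_pairwise_lt {ks : List Int} (hs : ks.Pairwise (· < ·))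
    (h : ks ≠ []) : ∀ y ∈ ks, y ≤ ks.getLast h := by
  induction ks with
  | nil => simp at h
  | cons k t ih =>
    intro y hy
    cases t with
    | nil => simp at hy; simp [hy]
    | cons a s =>
      rw [List.getLast_cons (by simp)]
      rcases List.mem_cons.1 hy with rfl | hyt
      · have hka : y < a := (List.pairwise_cons.1 hs).1 a (by simp)
        have := ih (List.pairwise_cons.1 hs).2 (by simp) a (by simp)
        omega
      · exact ih (List.pairwise_cons.1 hs).2 (by simp) y hyt

-- the gap-fill pass over the sorted remaining keys equals a gather over the index range
lemma fill_eq_gather (d : PySem.Dict Int String) :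
    ∀ (ks : List Int) (acc : List String),
    ks.Pairwise (· < ·) →
    (∀ k ∈ d.keys, ((acc.length : Int)) ≤ k → k ∈ ks) →
    (∀ k ∈ ks, k ∈ d.keys ∧ ((acc.length : Int)) ≤ k) →
    ks.foldl (fun dense col =>
        (dense ++ List.replicate ((col - (dense.length : Int)).toNat) "") ++ [d.getD col ""]) acc
      = acc ++ (PySem.List.pyRange (acc.length) (fillEnd ks (acc.length)) 1).map
          (fun i => d.getD i "") := by
  intro ks
  induction ks with
  | nil =>
    intro acc _ _ _
    simp [fillEnd, PySem.List.pyRange]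
  | cons k t ih =>
    intro acc hs hcov hmem
    have hk : k ∈ d.keys ∧ ((acc.length : Int)) ≤ k := hmem k (by simp)
    have hkn : (acc.length : Int) ≤ k := hk.2
    set acc' : List String :=
      (acc ++ List.replicate ((k - (acc.length : Int)).toNat) "") ++ [d.getD k ""] with hacc'
    have hlen' : ((acc'.length : Int)) = k + 1 := by
      simp [hacc']; omega
    have ih' := ih acc' (List.pairwise_cons.1 hs).2
      (by
        intro k' hk' hle
        rw [hlen'] at hle
        have : k' ∈ k :: t := hcov k' hk' (by omega)
        rcases List.mem_cons.1 this with rfl | h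
        · omega
        · exact h)
      (by
        intro k' hk'
        have h1 := (hmem k' (List.mem_cons_of_mem _ hk')).1
        have h2 := (List.pairwise_cons.1 hs).1 k' hk'
        rw [hlen']
        exact ⟨h1, by omega⟩)
    rw [List.foldl_cons, ih']
    rw [fillEnd_cons]
    have hend : fillEnd t (k + 1) = fillEnd t ((acc'.length : Int)) := by rw [hlen']
    rw [← hend]
    -- split the target range at k and k+1
    have hendge : k + 1 ≤ fillEnd t (k + 1) := by
      cases t with
      | nil => simp [fillEnd]
      | cons a s =>
        have ha : a ∈ a :: s := by simp
        have hka : k < a := (List.pairwise_cons.1 hs).1 a ha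
        have hlast := le_getLast_of_pairwise_lt
          (ks := a :: s) (List.pairwise_cons.1 hs).2 (by simp) a ha
        rw [fillEnd_of_ne_nil (a :: s) (k + 1) (by simp)]
        omega
    have hsplit1 : PySem.List.pyRange (acc.length) (fillEnd t (k + 1)) 1
        = PySem.List.pyRange (acc.length) k 1 ++ PySem.List.pyRange k (fillEnd t (k + 1)) 1 :=
      PySem.List.pyRange_one_append _ _ _ hkn (by omega)
    have hsplit2 : PySem.List.pyRange k (fillEnd t (k + 1)) 1
        = PySem.List.pyRange k (k + 1) 1 ++ PySem.List.pyRange (k + 1) (fillEnd t (k + 1)) 1 :=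
      PySem.List.pyRange_one_append _ _ _ (by omega) hendge
    have hgap : (PySem.List.pyRange (acc.length) k 1).map (fun i => d.getD i "")
        = List.replicate ((k - (acc.length : Int)).toNat) "" := by
      have hmemb : ∀ b ∈ (PySem.List.pyRange (acc.length) k 1).map (fun i => d.getD i ""),
          b = "" := ?_
      · have h := List.eq_replicate_of_mem hmemb
        rwa [List.length_map, PySem.List.length_pyRange_one] at h
      intro b hb
      rcases List.mem_map.1 hb with ⟨i, hi, hib⟩
      have hiR := PySem.List.mem_pyRange_one.1 hi
      have hnotkey : i ∉ d.keys := by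
        intro hik
        have : i ∈ k :: t := hcov i hik (by omega)
        rcases List.mem_cons.1 this with rfl | h
        · omega
        · have := ((hmem i (List.mem_cons_of_mem _ h)).2)
          have hki : k < i := (List.pairwise_cons.1 hs).1 i h
          omega
      rw [← hib, PySem.Dict.getD_eq_get?_getD,
        (PySem.Dict.get?_eq_none_iff_not_mem_keys _ _).2 hnotkey]
      rfl
    have hone : PySem.List.pyRange k (k + 1) 1 = [k] := by
      rw [PySem.List.pyRange_one_cons (by omega)]
      simp [PySem.List.pyRange]
    rw [hsplit1, hsplit2, hone, List.map_append, List.map_append, hgap]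
    have hlenNat : acc'.length = (k + 1).toNat := by omega
    have hstart : ((acc'.length : Int)) = k + 1 := hlen'
    rw [hstart]
    simp [hacc', List.append_assoc]
  -- length of the replicate-checked gap is fixed by hgap's replicate count via eq_replicate

-- B unfolded: the gap-fill over ALL sorted keys is the gather over [0, max+1)
lemma alt_eq_gather (xs : List (Int × String))
    (hpre : ∀ p ∈ xs, 0 ≤ p.1) :
    sparse_to_dense_row_py_alt xs
      = (PySem.List.pyRange 0
          (fillEnd (PySem.List.sorted (PySem.Dict.ofList xs).keys (fun k => k) false) 0) 1).map
          (fun i => (PySem.Dict.ofList xs).getD i "") := by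
  set d := PySem.Dict.ofList xs with hd
  set ks := PySem.List.sorted d.keys (fun k => k) false with hks
  have hsorted : ks.Pairwise (· < ·) := by
    rw [hks, hd, keys_ofList_eq]
    exact PySem.List.sorted_ofList_pairwise_lt _
  have h := fill_eq_gather d ks []
    hsorted
    (by intro k hk _; rw [hks]; exact (PySem.List.mem_sorted _ _ _ _).2 hk)
    (by
      intro k hk
      have hkk : k ∈ d.keys := (PySem.List.mem_sorted _ _ _ _).1 (hks ▸ hk)
      refine ⟨hkk, ?_⟩
      rcases mem_keys_ofList (hd ▸ hkk) with ⟨p, hp, hpk⟩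
      simp only [List.length_nil, Nat.cast_zero]
      rw [← hpk]; exact hpre p hp)
  simpa [sparse_to_dense_row_py_alt, ← hd, ← hks] using h

-- ===== VERDICT (by name: the statement is the Claim_ definition above) =====
theorem sparse_to_dense_row_py_spec : Claim_equal_sparse_to_dense_row_py := by
  intro xs _hdom hpre
  unfold Spec_sparse_to_dense_row_py
  rw [alt_eq_gather xs hpre]
  unfold sparse_to_dense_row_py
  set d := PySem.Dict.ofList xs with hd
  set ks := PySem.List.sorted d.keys (fun k => k) false with hks
  by_cases hemp : d.items = []
  · have hkeys : d.keys = [] := by simp [PySem.Dict.keys, hemp]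
    have : ks = [] := by rw [hks, hkeys]; simp [PySem.List.sorted_eq_nil_iff]
    simp [hemp, this, fillEnd, PySem.List.pyRange]
  · simp only [hemp, ite_false]
    have hkeysne : d.keys ≠ [] := by
      simp [PySem.Dict.keys]; exact hemp
    cases hmax : PySem.List.max? d.keys (fun k => k) with
    | none => exact absurd ((PySem.List.max?_eq_none_iff _ _).1 hmax) hkeysne
    | some m =>
      -- the sorted key list is nonempty and its last element is the maximum m
      have hksne : ks ≠ [] := by
        rw [hks]; simpa [PySem.List.sorted_eq_nil_iff] using hkeysne
      have hsorted : ks.Pairwise (· < ·) := by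
        rw [hks, hd, keys_ofList_eq]
        exact PySem.List.sorted_ofList_pairwise_lt _
      have hmemks : ∀ x, x ∈ ks ↔ x ∈ d.keys := by
        intro x; rw [hks]; exact PySem.List.mem_sorted _ _ _ _
      have hlastmem : ks.getLast hksne ∈ d.keys :=
        (hmemks _).1 (List.getLast_mem hksne)
      have hmmem : m ∈ ks := (hmemks m).2 (PySem.List.max?_mem hmax)
      have hlast_eq : ks.getLast hksne = m := by
        have h1 : ks.getLast hksne ≤ m :=
          PySem.List.max?_isMax hmax _ hlastmem
        have h2 : m ≤ ks.getLast hksne :=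
          le_getLast_of_pairwise_lt hsorted hksne m hmmem
        omega
      have hfe : fillEnd ks 0 = m + 1 := by
        rw [fillEnd_of_ne_nil ks 0 hksne, hlast_eq]
      rw [hfe]
      -- nonnegativity and range of the keys
      have hkeysnn : ∀ k ∈ d.keys, 0 ≤ k := by
        intro k hk
        rcases mem_keys_ofList (hd ▸ hk) with ⟨p, hp, hpk⟩
        rw [← hpk]; exact hpre p hp
      have hm0 : 0 ≤ m := hkeysnn m (PySem.List.max?_mem hmax)
      have hle : ∀ k ∈ d.keys, k ≤ m := PySem.List.max?_id_le hmax
      have hnd : (d.items.map Prod.fst).Nodup := by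
        have := PySem.Dict.nodup_keys_ofList (κ := Int) (ν := String) xs
        simpa [PySem.Dict.keys, hd] using this
      have hnlen : ∀ p ∈ d.items, 0 ≤ p.1 ∧ p.1.toNat < (m + 1).toNat := by
        intro p hp
        have hk : p.1 ∈ d.keys := List.mem_map.2 ⟨p, hp, rfl⟩
        exact ⟨hkeysnn _ hk, by have := hle _ hk; omega⟩
      apply List.ext_getElem
      · rw [length_foldl_pySetD]
        simp [PySem.List.length_pyRange_one]
      · intro j hjl hjr
        have hjn : j < (m + 1).toNat := by
          rw [length_foldl_pySetD] at hjl; simpa using hjl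
        have hrepl : (List.replicate (m + 1).toNat "").length = (m + 1).toNat := by simp
        rw [List.getElem_map, PySem.List.getElem_pyRange_one]
        have hL := foldl_pySetD_getD d.items (List.replicate (m + 1).toNat "")
          hnd (by simpa [hrepl] using hnlen) j (by simpa [hrepl] using hjn)
        rw [List.getD_eq_getElem _ _ (by rw [length_foldl_pySetD]; simpa [hrepl] using hjn)] at hL
        rw [hL]
        have hfind : ((d.items.find? (fun kv => kv.1 == (j : Int))).map Prod.snd) = d.get? (j : Int) := rfl
        simp [hfind, PySem.Dict.getD_eq_get?_getD]
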